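-- pv_equiv track=rewrite | github.com/imnotnoahhh/vex | scripts/test_vex_release_strict.py | pick_preferred_alt_version
-- ===== SOURCE A (Python) =====
-- from typing import Dict, Iterable, List, Optional, Sequence, Tuple
--
-- def pick_preferred_alt_version(tool_name: str, resolved_version: str, versions: Sequence[str]) -> Optional[str]:
--     if not versions:
--         return None
--
--     if tool_name == "node":
--         major = resolved_version.split(".", 1)[0]
--         for version in versions:
--             if version.startswith(f"{major}."):
--                 return version
--
--     if tool_name == "python":
--         major_minor = ".".join(resolved_version.split(".")[:2])
--         for version in versions:
--             if version.startswith(f"{major_minor}."):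
--                 return version
--         resolved_major = resolved_version.split(".", 1)[0]
--         for version in versions:
--             if version.startswith(f"{resolved_major}."):
--                 return version
--
--     if tool_name == "go":
--         major = resolved_version.split(".", 1)[0]
--         for version in versions:
--             if version.startswith(f"{major}."):
--                 return version
--
--     return versions[0]
-- ===== SOURCE B (Python) =====
-- def _rank(prefixes, v):
--     if not prefixes:
--         return 0
--     if v.startswith(prefixes[0]):
--         return 0
--     return 1 + _rank(prefixes[1:], v)
--
--
-- def pick_preferred_alt_version(tool_name, resolved_version, versions):
--     if not versions:
--         return None
--     if tool_name == "python":
--         prefixes = [".".join(resolved_version.split(".")[:2]) + ".",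
--                     resolved_version.split(".", 1)[0] + "."]
--     elif tool_name in ("node", "go"):
--         prefixes = [resolved_version.split(".", 1)[0] + "."]
--     else:
--         prefixes = []
--     ranks = [_rank(prefixes, v) for v in versions]
--     m = min(ranks)
--     if m == len(prefixes):
--         return versions[0]
--     return versions[ranks.index(m)]
-- ===== Notes on version B (the rewrite author's own statement) =====
-- stated objective: alternative
-- what changed: A runs up to four sequential tool-specific scan-and-return loops over versions; B builds the ordered prefix list once, computes for every version the rank of the first prefix it matches in a single pass, and returns the first version of minimal rank (versions[0] when no prefix matches).
import Mathlib
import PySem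

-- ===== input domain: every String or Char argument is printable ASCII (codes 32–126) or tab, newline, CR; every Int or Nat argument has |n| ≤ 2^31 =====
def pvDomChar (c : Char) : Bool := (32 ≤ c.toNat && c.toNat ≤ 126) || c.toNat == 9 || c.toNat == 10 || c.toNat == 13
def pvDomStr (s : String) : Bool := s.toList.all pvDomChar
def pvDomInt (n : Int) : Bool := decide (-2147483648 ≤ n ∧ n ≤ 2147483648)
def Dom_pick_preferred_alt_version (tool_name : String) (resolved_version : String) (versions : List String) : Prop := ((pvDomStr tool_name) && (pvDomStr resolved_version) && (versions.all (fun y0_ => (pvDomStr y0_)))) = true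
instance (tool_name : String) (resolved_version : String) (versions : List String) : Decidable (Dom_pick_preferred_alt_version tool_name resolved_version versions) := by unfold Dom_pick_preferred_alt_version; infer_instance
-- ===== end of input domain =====

-- B replaces A's four sequential prefix-scan branches by one rank-per-version pass:
-- it builds the ordered prefix list once, ranks every version by the first prefix it
-- matches, and returns the first version of minimal rank (objective: alternative).

-- ===== PORT A =====
-- 'for version in versions: if version.startswith(pref): return version' as a recursion
def pyScanPref (pref : String) : List String → Option String
  | [] => none
  | v :: rest => if PySem.Str.startswith v pref then some v else pyScanPref pref rest

def pick_preferred_alt_version (tool_name : String) (resolved_version : String) (versions : List String) : Option String :=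
  if versions = [] then none
  else
    let r1 : Option String :=
      if tool_name = "node" then
        -- split(".", 1)[0]: split with a nonempty sep never returns [], so getD/headD are exact
        let major := ((PySem.Str.splitMax? resolved_version "." 1).getD []).headD ""
        pyScanPref (major ++ ".") versions
      else none
    match r1 with
    | some v => some v
    | none =>
      let r2 : Option String :=
        if tool_name = "python" then
          let major_minor := PySem.Str.join "." (PySem.List.slice ((PySem.Str.split? resolved_version ".").getD []) none (some 2))
          match pyScanPref (major_minor ++ ".") versions with
          | some v => some v
          | none =>
            let resolved_major := ((PySem.Str.splitMax? resolved_version "." 1).getD []).headD ""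
            pyScanPref (resolved_major ++ ".") versions
        else none
      match r2 with
      | some v => some v
      | none =>
        let r3 : Option String :=
          if tool_name = "go" then
            let major := ((PySem.Str.splitMax? resolved_version "." 1).getD []).headD ""
            pyScanPref (major ++ ".") versions
          else none
        match r3 with
        | some v => some v
        | none => PySem.List.pyGet? versions 0

-- ===== PORT B =====
-- index of the first prefix that v starts with, else the number of prefixes (Source B's _rank)
def rankOf : List String → String → Nat
  | [], _ => 0
  | p :: ps, v => if PySem.Str.startswith v p then 0 else 1 + rankOf ps v

def pick_preferred_alt_version_alt (tool_name : String) (resolved_version : String) (versions : List String) : Option String :=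
  if versions = [] then none
  else
    let prefixes : List String :=
      if tool_name = "python" then
        [PySem.Str.join "." (PySem.List.slice ((PySem.Str.split? resolved_version ".").getD []) none (some 2)) ++ ".",
         ((PySem.Str.splitMax? resolved_version "." 1).getD []).headD "" ++ "."]
      else if tool_name = "node" ∨ tool_name = "go" then
        [((PySem.Str.splitMax? resolved_version "." 1).getD []).headD "" ++ "."]
      else []
    let ranks := versions.map (rankOf prefixes)
    match PySem.List.min? ranks (fun x => x) with
    | none => none  -- unreachable: versions ≠ [] so ranks ≠ []
    | some m =>
      if m = prefixes.length then PySem.List.pyGet? versions 0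
      else
        match PySem.List.index? ranks m with
        | some i => PySem.List.pyGet? versions (i : Int)  -- m ∈ ranks, so index? succeeds
        | none => none

-- ===== PRECONDITION & SPEC =====
def Spec_pick_preferred_alt_version (tool_name : String) (resolved_version : String) (versions : List String) (out : Option String) : Prop := out = pick_preferred_alt_version_alt tool_name resolved_version versions
instance (tool_name : String) (resolved_version : String) (versions : List String) (out : Option String) : Decidable (Spec_pick_preferred_alt_version tool_name resolved_version versions out) := by unfold Spec_pick_preferred_alt_version; infer_instance

-- ===== CLAIM (what is proved, stated in full; the proofs are below) =====
def Claim_equal_pick_preferred_alt_version : Prop := ∀ (tool_name : String) (resolved_version : String) (versions : List String), Dom_pick_preferred_alt_version tool_name resolved_version versions → Spec_pick_preferred_alt_version tool_name resolved_version versions (pick_preferred_alt_version tool_name resolved_version versions)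

-- ===== LEMMAS AND PROOFS =====

-- A's cascade, abstracted over the ordered prefix list
def stagedF (vs : List String) : List String → Option String
  | [] => PySem.List.pyGet? vs 0
  | p :: ps =>
    match pyScanPref p vs with
    | some v => some v
    | none => stagedF vs ps

-- B's selection, abstracted over the ordered prefix list
def bsel (ps vs : List String) : Option String :=
  let ranks := vs.map (rankOf ps)
  match PySem.List.min? ranks (fun x => x) with
  | none => none
  | some m =>
    if m = ps.length then PySem.List.pyGet? vs 0
    else
      match PySem.List.index? ranks m with
      | some i => PySem.List.pyGet? vs (i : Int)
      | none => none

lemma min?_id_unique (xs : List Nat) (m : Nat) (h1 : m ∈ xs) (h2 : ∀ y ∈ xs, m ≤ y) :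
    PySem.List.min? xs (fun x => x) = some m := by
  cases hmin : PySem.List.min? xs (fun x => x) with
  | none =>
    rw [PySem.List.min?_eq_none_iff] at hmin
    subst hmin; simp at h1
  | some m' =>
    have hmem := PySem.List.min?_mem hmin
    have hle : m' ≤ m := PySem.List.min?_isMin hmin m h1
    have : m ≤ m' := h2 m' hmem
    have : m' = m := by omega
    rw [this]

lemma index?_eq_some_of (xs : List Nat) (v : Nat) (k : Nat) (hk : k < xs.length)
    (h1 : xs[k] = v) (h2 : ∀ j (hj : j < k), xs[j]'(by omega) ≠ v) :
    PySem.List.index? xs v = some k := by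
  induction xs generalizing k with
  | nil => simp at hk
  | cons a t ih =>
    cases k with
    | zero =>
      simp at h1; subst h1
      exact PySem.List.index?_cons_self a t
    | succ k' =>
      have hne : a ≠ v := by
        have := h2 0 (by omega); simpa using this
      rw [PySem.List.index?_cons_of_ne t hne]
      have := ih k' (by simpa using hk) (by simpa using h1)
        (fun j hj => by have := h2 (j+1) (by omega); simpa using this)
      rw [this]; rfl

lemma index?_map_add_one (l : List Nat) (m : Nat) :
    PySem.List.index? (l.map (1 + ·)) (1 + m) = PySem.List.index? l m := by
  induction l with
  | nil => simp [PySem.List.index?_eq_idxOf?]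
  | cons a t ih =>
    by_cases h : a = m
    · subst h
      rw [List.map_cons, PySem.List.index?_cons_self, PySem.List.index?_cons_self]
    · have h1 : (1 + a) ≠ (1 + m) := by omega
      rw [List.map_cons, PySem.List.index?_cons_of_ne _ h1, PySem.List.index?_cons_of_ne _ h, ih]

lemma scanPref_eq_none_iff (p : String) (vs : List String) :
    pyScanPref p vs = none ↔ ∀ v ∈ vs, PySem.Str.startswith v p = false := by
  induction vs with
  | nil => simp [pyScanPref]
  | cons v t ih =>
    cases h : PySem.Str.startswith v p with
    | true =>
      simp only [pyScanPref, h, if_true]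
      simp only [PySem.Str.startswith_eq] at h
      simp [h]
    | false =>
      simp only [pyScanPref, h, Bool.false_eq_true, if_false]
      simp only [PySem.Str.startswith_eq] at h
      simp only [PySem.Str.startswith_eq] at ih
      simp [h, ih]

lemma scanPref_eq_some (p : String) (vs : List String) (w : String)
    (h : pyScanPref p vs = some w) :
    ∃ (i : Nat) (hi : i < vs.length), vs[i] = w ∧ PySem.Str.startswith w p = true ∧
      ∀ j (hj : j < i), PySem.Str.startswith (vs[j]'(by omega)) p = false := by
  induction vs with
  | nil => simp [pyScanPref] at h
  | cons v t ih =>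
    cases hv : PySem.Str.startswith v p with
    | true =>
      rw [pyScanPref, hv, if_pos rfl] at h
      have hw : v = w := by simpa using h
      subst hw
      exact ⟨0, by simp, by simp, hv, by omega⟩
    | false =>
      rw [pyScanPref, hv] at h
      simp only [Bool.false_eq_true, if_false] at h
      obtain ⟨i, hi, h1, h2, h3⟩ := ih h
      refine ⟨i + 1, by simpa using hi, by simpa using h1, h2, ?_⟩
      intro j hj
      cases j with
      | zero => simpa using hv
      | succ j' => simpa using h3 j' (by omega)

lemma core (ps vs : List String) (hvs : vs ≠ []) : stagedF vs ps = bsel ps vs := by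
  induction ps with
  | nil =>
    have hmem : (0 : Nat) ∈ vs.map (rankOf []) := by
      cases vs with
      | nil => exact absurd rfl hvs
      | cons v t => simp [rankOf]
    rw [stagedF, bsel]
    simp only [min?_id_unique _ 0 hmem (fun y _ => by omega)]
    simp
  | cons p ps' ih =>
    cases hscan : pyScanPref p vs with
    | some w =>
      obtain ⟨i, hi, hvi, hw, hfirst⟩ := scanPref_eq_some p vs w hscan
      have hri : (vs.map (rankOf (p :: ps')))[i]'(by simpa using hi) = 0 := by
        simp only [List.getElem_map, rankOf]
        rw [hvi, hw]; simp
      have hmem0 : (0 : Nat) ∈ vs.map (rankOf (p :: ps')) := by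
        rw [← hri]; exact List.getElem_mem _
      have hmin : PySem.List.min? (vs.map (rankOf (p :: ps'))) (fun x => x) = some 0 :=
        min?_id_unique _ 0 hmem0 (fun y _ => by omega)
      have hidx : PySem.List.index? (vs.map (rankOf (p :: ps'))) 0 = some i := by
        apply index?_eq_some_of _ _ _ (by simpa using hi) hri
        intro j hj
        simp only [List.getElem_map, rankOf]
        rw [hfirst j hj]; simp
      rw [stagedF, hscan, bsel]
      simp only [hmin, hidx]
      rw [if_neg (by simp), PySem.List.pyGet?_natCast]
      simp [List.getElem?_eq_getElem hi, hvi]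
    | none =>
      have hnone := (scanPref_eq_none_iff p vs).mp hscan
      have hmap : vs.map (rankOf (p :: ps')) = (vs.map (rankOf ps')).map (1 + ·) := by
        rw [List.map_map]
        apply List.map_congr_left
        intro v hv
        simp only [Function.comp, rankOf, hnone v hv, Bool.false_eq_true, if_false]
      rw [stagedF, hscan, ih, bsel, bsel]
      simp only [hmap]
      cases hmin' : PySem.List.min? (vs.map (rankOf ps')) (fun x => x) with
      | none =>
        rw [PySem.List.min?_eq_none_iff] at hmin'
        exact absurd (by simpa using hmin') hvs
      | some m' =>
        have hle' := PySem.List.min?_isMin hmin'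
        have hmin2 : PySem.List.min? ((vs.map (rankOf ps')).map (1 + ·)) (fun x => x) = some (1 + m') := by
          apply min?_id_unique
          · exact List.mem_map_of_mem (PySem.List.min?_mem hmin')
          · intro y hy
            obtain ⟨y', hy', rfl⟩ := List.mem_map.mp hy
            have := hle' y' hy'
            simp at this ⊢
            omega
        simp only [hmin2]
        by_cases hlen : m' = ps'.length
        · rw [if_pos hlen, if_pos (by simp only [hlen, List.length_cons]; omega)]
        · rw [if_neg hlen, if_neg (by simp; omega)]
          rw [index?_map_add_one]

-- ===== VERDICT (by name: the statement is the Claim_ definition above) =====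
theorem pick_preferred_alt_version_spec : Claim_equal_pick_preferred_alt_version := by
  intro tn rv vs _
  unfold Spec_pick_preferred_alt_version
  by_cases hvs : vs = []
  · subst hvs
    rw [pick_preferred_alt_version, pick_preferred_alt_version_alt]
    simp
  · rw [pick_preferred_alt_version_alt, if_neg hvs, ← bsel, ← core _ _ hvs]
    rw [pick_preferred_alt_version, if_neg hvs]
    by_cases h1 : tn = "python"
    · subst h1
      rw [if_neg (show ¬("python" : String) = "node" by decide),
          if_pos (rfl : ("python" : String) = "python"),
          if_neg (show ¬("python" : String) = "go" by decide),
          if_pos (rfl : ("python" : String) = "python")]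
      cases h2 : pyScanPref (PySem.Str.join "." (PySem.List.slice ((PySem.Str.split? rv ".").getD []) none (some 2)) ++ ".") vs with
      | some w => simp only [stagedF, h2]
      | none =>
        cases h3 : pyScanPref (((PySem.Str.splitMax? rv "." 1).getD []).headD "" ++ ".") vs with
        | some w => simp only [stagedF, h2, h3]
        | none => simp only [stagedF, h2, h3]
    · by_cases h2 : tn = "node"
      · subst h2
        rw [if_pos (rfl : ("node" : String) = "node"),
            if_neg (show ¬("node" : String) = "python" by decide),
            if_neg (show ¬("node" : String) = "go" by decide),
            if_neg (show ¬("node" : String) = "python" by decide),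
            if_pos (Or.inl rfl : ("node" : String) = "node" ∨ ("node" : String) = "go")]
        cases h3 : pyScanPref (((PySem.Str.splitMax? rv "." 1).getD []).headD "" ++ ".") vs with
        | some w => simp only [stagedF, h3]
        | none => simp only [stagedF, h3]
      · by_cases h3 : tn = "go"
        · subst h3
          rw [if_neg (show ¬("go" : String) = "node" by decide),
              if_neg (show ¬("go" : String) = "python" by decide),
              if_pos (rfl : ("go" : String) = "go"),
              if_neg (show ¬("go" : String) = "python" by decide),
              if_pos (Or.inr rfl : ("go" : String) = "node" ∨ ("go" : String) = "go")]
          cases h4 : pyScanPref (((PySem.Str.splitMax? rv "." 1).getD []).headD "" ++ ".") vs with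
          | some w => simp only [stagedF, h4]
          | none => simp only [stagedF, h4]
        · rw [if_neg h2, if_neg h1, if_neg h3, if_neg h1,
              if_neg (show ¬(tn = "node" ∨ tn = "go") by tauto)]
          simp [stagedF]
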